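-- pv_equiv track=rewrite | github.com/AvariceZhao/Learning-Material-In-SUDA | Python/考试/2021.11.24阶段化考试一/2127405037.py | func7
-- ===== SOURCE A (Python) =====
-- def func7(lst):
--     j=[]
--     o=[]
--     for i in lst:
--         if i%2==1:
--             j.append(i)
--         else:
--             o.append(i)
--     j.sort()
--     o.sort(reverse=True)
--     return j+o
--     pass
-- ===== SOURCE B (Python) =====
-- def func7(lst):
--     s = sorted(lst)
--     odds = [x for x in s if x % 2 == 1]
--     evens = [x for x in reversed(s) if x % 2 == 0]
--     return odds + evens
-- ===== Notes on version B (the rewrite author's own statement) =====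
-- stated objective: alternative
-- what changed: Sorts the whole list once and then partitions with two oppositely-directed filter passes (forward for ascending odds, backward for descending evens), instead of partitioning first and running two separate sorts.
import Mathlib
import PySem

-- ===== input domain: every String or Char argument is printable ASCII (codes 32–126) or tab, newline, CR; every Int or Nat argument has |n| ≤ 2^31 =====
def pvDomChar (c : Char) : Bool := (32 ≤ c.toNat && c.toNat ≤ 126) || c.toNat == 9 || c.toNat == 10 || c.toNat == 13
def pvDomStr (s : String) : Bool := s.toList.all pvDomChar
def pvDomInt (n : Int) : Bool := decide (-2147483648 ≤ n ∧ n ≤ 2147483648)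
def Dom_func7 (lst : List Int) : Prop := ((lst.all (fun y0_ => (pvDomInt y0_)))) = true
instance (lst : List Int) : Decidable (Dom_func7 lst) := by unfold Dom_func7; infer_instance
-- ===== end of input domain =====

-- B sorts the whole list once, then collects odds by a forward filter and evens by a
-- backward filter, instead of A's partition-first-then-sort-each-half; same cost, different decomposition.
-- ===== PORT A =====
def func7 (lst : List Int) : List Int :=
  let jo := lst.foldl (fun (acc : List Int × List Int) i =>
    if PySem.Int.mod i 2 = 1 then (acc.1 ++ [i], acc.2) else (acc.1, acc.2 ++ [i])) ([], [])
  PySem.List.sorted jo.1 (fun x => x) false ++ PySem.List.sorted jo.2 (fun x => x) true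

-- ===== PORT B =====
def func7_alt (lst : List Int) : List Int :=
  let s := PySem.List.sorted lst (fun x => x) false
  (s.filter (fun x => PySem.Int.mod x 2 == 1)) ++ (s.reverse.filter (fun x => PySem.Int.mod x 2 == 0))

-- ===== PRECONDITION & SPEC =====
def Spec_func7 (lst : List Int) (out : List Int) : Prop := out = func7_alt lst
instance (lst : List Int) (out : List Int) : Decidable (Spec_func7 lst out) := by unfold Spec_func7; infer_instance

-- ===== CLAIM (what is proved, stated in full; the proofs are below) =====
def Claim_equal_func7 : Prop := ∀ (lst : List Int), Dom_func7 lst → Spec_func7 lst (func7 lst)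

-- ===== LEMMAS AND PROOFS =====
-- the fold accumulates exactly the two filters, onto any starting accumulators
lemma foldA (lst j o : List Int) :
    lst.foldl (fun (acc : List Int × List Int) i =>
      if PySem.Int.mod i 2 = 1 then (acc.1 ++ [i], acc.2) else (acc.1, acc.2 ++ [i])) (j, o)
    = (j ++ lst.filter (fun x => PySem.Int.mod x 2 == 1),
       o ++ lst.filter (fun x => PySem.Int.mod x 2 == 0)) := by
  induction lst generalizing j o with
  | nil => simp
  | cons x xs ih =>
    simp only [PySem.Int.mod_eq_emod_of_pos (show (0:Int) < 2 by norm_num)] at ih ⊢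
    rcases (by omega : x % 2 = 0 ∨ x % 2 = 1) with h | h <;>
      simp [List.foldl_cons, h, ih]

lemma sorted_filter (lst : List Int) (p : Int → Bool) :
    PySem.List.sorted (lst.filter p) (fun x => x) false
      = (PySem.List.sorted lst (fun x => x) false).filter p := by
  apply PySem.List.sorted_id_eq_of_perm_of_pairwise
  · exact (PySem.List.sorted_perm lst (fun x => x) false).filter p
  · exact (PySem.List.sorted_pairwise lst (fun x => x)).filter _

lemma sorted_rev_filter (lst : List Int) (p : Int → Bool) :
    PySem.List.sorted (lst.filter p) (fun x => x) true
      = ((PySem.List.sorted lst (fun x => x) false).filter p).reverse := by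
  have h := PySem.List.eq_of_perm_of_pairwise_le_of_injective (fun x : Int => x)
    (fun a b h => h)
    (l₁ := (PySem.List.sorted (lst.filter p) (fun x => x) true).reverse)
    (l₂ := (PySem.List.sorted lst (fun x => x) false).filter p)
    (by
      refine List.reverse_perm _ |>.trans ?_
      exact ((PySem.List.sorted_perm (lst.filter p) (fun x => x) true).trans
        ((PySem.List.sorted_perm lst (fun x => x) false).filter p).symm))
    (by
      rw [List.pairwise_reverse]
      exact PySem.List.sorted_pairwise_rev (lst.filter p) (fun x => x))
    ((PySem.List.sorted_pairwise lst (fun x => x)).filter _)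
  calc PySem.List.sorted (lst.filter p) (fun x => x) true
      = (PySem.List.sorted (lst.filter p) (fun x => x) true).reverse.reverse := by
        rw [List.reverse_reverse]
    _ = _ := by rw [h]

-- ===== VERDICT (by name: the statement is the Claim_ definition above) =====
theorem func7_spec : Claim_equal_func7 := by
  intro lst _
  show func7 lst = func7_alt lst
  unfold func7 func7_alt
  simp only [foldA lst [] [], List.nil_append, List.filter_reverse]
  rw [sorted_filter, sorted_rev_filter]
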